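-- pv_equiv track=rewrite | github.com/zouyi777/py_nn_999 | utils/pre_data_utils.py | preDataAdd0
-- ===== SOURCE A (Python) =====
-- def appendTo3(label_sequence_str):
--     label_sequence_str = str(label_sequence_str)
--     label_sequence = []
--     label_sequence.append(int(label_sequence_str[0]))  # A
--     label_sequence.append(int(label_sequence_str[1]))  # B
--     label_sequence.append(int(label_sequence_str[2]))  # C
--     return sorted(label_sequence) # 组选的话，从小到大排个序
--
-- def preDataAdd0(src_list,piece_len):
--     pre_list = []
--     for i in range(len(src_list)-piece_len):
--         item = []
--         for j in range(piece_len):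
--             appendTo3Str = src_list[i+j]
--             appendTo3List = appendTo3(appendTo3Str)
--             item.append(appendTo3List)
--         pre_list.append(item)
--     return pre_list
-- ===== SOURCE B (Python) =====
-- def appendTo3(label_sequence_str):
--     label_sequence_str = str(label_sequence_str)
--     label_sequence = []
--     label_sequence.append(int(label_sequence_str[0]))  # A
--     label_sequence.append(int(label_sequence_str[1]))  # B
--     label_sequence.append(int(label_sequence_str[2]))  # C
--     return sorted(label_sequence)
--
-- def preDataAdd0(src_list, piece_len):
--     num = len(src_list) - piece_len          # number of produced windows
--     if piece_len <= 0 or num <= 0: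
--         return [[] for _ in range(num)]      # degenerate sizes: windows read no element
--     # convert each element some window reads exactly once, then slice the windows out
--     conv = [appendTo3(x) for x in src_list[:num + piece_len - 1]]
--     return [conv[i:i + piece_len] for i in range(num)]
-- ===== Notes on version B (the rewrite author's own statement) =====
-- stated objective: alternative
-- what changed: A reconverts src_list[i+j] inside a nested i/j loop (each element converted up to piece_len times); B converts each element the windows read exactly once into a table (after one guard returning the empty windows of the degenerate sizes) and cuts every window out of the table with a slice, trading fewer conversions for the table's memory.
import Mathlib
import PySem

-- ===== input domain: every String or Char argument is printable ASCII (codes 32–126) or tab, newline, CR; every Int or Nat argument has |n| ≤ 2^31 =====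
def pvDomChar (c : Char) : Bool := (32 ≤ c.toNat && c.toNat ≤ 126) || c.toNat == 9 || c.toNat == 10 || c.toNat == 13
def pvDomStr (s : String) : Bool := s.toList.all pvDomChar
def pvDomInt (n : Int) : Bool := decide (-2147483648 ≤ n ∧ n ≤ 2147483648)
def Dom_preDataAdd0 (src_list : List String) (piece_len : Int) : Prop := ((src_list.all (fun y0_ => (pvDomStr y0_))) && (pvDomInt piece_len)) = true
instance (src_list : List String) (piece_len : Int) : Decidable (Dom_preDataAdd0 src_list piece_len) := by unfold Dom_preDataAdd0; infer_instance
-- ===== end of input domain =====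

-- B converts each element the windows read exactly once into a table and slices the
-- windows out of it; A's nested loop reconverts src_list[i+j] inside every window.

-- ===== PORT A =====
-- appendTo3: int(s[0]), int(s[1]), int(s[2]), sorted; raising steps return none,
-- collapsed to [] by getD — Pre_ excludes every input where the Python raises.
def appendTo3Port (s : String) : List Int :=
  (do
    let c0 ← PySem.Str.pyGet? s 0
    let a ← PySem.Int.ofChars? [c0]
    let c1 ← PySem.Str.pyGet? s 1
    let b ← PySem.Int.ofChars? [c1]
    let c2 ← PySem.Str.pyGet? s 2
    let c ← PySem.Int.ofChars? [c2]
    pure (PySem.List.sorted [a, b, c] (fun x => x) false)).getD []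

def preDataAdd0 (src_list : List String) (piece_len : Int) : List (List (List Int)) :=
  (PySem.List.pyRange 0 ((src_list.length : Int) - piece_len) 1).foldl
    (fun pre_list i =>
      pre_list ++
        [(PySem.List.pyRange 0 piece_len 1).foldl
          (fun item j =>
            item ++ [appendTo3Port (PySem.List.pyGetD src_list (i + j) "")]) []])
    []

-- ===== PORT B =====
def preDataAdd0_alt (src_list : List String) (piece_len : Int) : List (List (List Int)) :=
  let num : Int := (src_list.length : Int) - piece_len
  if piece_len ≤ 0 ∨ num ≤ 0 then
    (PySem.List.pyRange 0 num 1).map (fun _ => ([] : List (List Int)))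
  else
    let conv := (PySem.List.slice src_list none (some (num + piece_len - 1))).map appendTo3Port
    (PySem.List.pyRange 0 num 1).map (fun i => PySem.List.slice conv (some i) (some (i + piece_len)))

-- ===== PRECONDITION & SPEC =====
-- Pre_ is exactly A's domain: it excludes only the inputs on which the Python A raises,
-- i.e. piece_len strictly between 0 and len(src_list) with a string among the first
-- len(src_list)-1 that is not a digit triplet (A reads exactly those and int() raises).
def Pre_preDataAdd0 (src_list : List String) (piece_len : Int) : Prop :=
  piece_len ≤ 0 ∨ (src_list.length : Int) ≤ piece_len ∨
    ((src_list.take (src_list.length - 1)).all fun s =>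
      decide (3 ≤ s.toList.length) &&
        (s.toList.take 3).all fun c => (PySem.Int.ofChars? [c]).isSome) = true
instance (src_list : List String) (piece_len : Int) : Decidable (Pre_preDataAdd0 src_list piece_len) := by
  unfold Pre_preDataAdd0; infer_instance

def pvWitness_preDataAdd0 : List String × Int := (["123", "047", "990"], 1)

def Spec_preDataAdd0 (src_list : List String) (piece_len : Int) (out : List (List (List Int))) : Prop := out = preDataAdd0_alt src_list piece_len
instance (src_list : List String) (piece_len : Int) (out : List (List (List Int))) : Decidable (Spec_preDataAdd0 src_list piece_len out) := by unfold Spec_preDataAdd0; infer_instance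

-- ===== CLAIM (what is proved, stated in full; the proofs are below) =====
def Claim_equal_preDataAdd0 : Prop := ∀ (src_list : List String) (piece_len : Int), Dom_preDataAdd0 src_list piece_len → Pre_preDataAdd0 src_list piece_len → Spec_preDataAdd0 src_list piece_len (preDataAdd0 src_list piece_len)

-- ===== LEMMAS AND PROOFS =====

-- One window of the main case: A's inner fold over j equals B's slice of the converted prefix.
theorem window_eq (src_list : List String) (p i : Int) (hp : 0 < p)
    (hi : 0 ≤ i) (hin : i < (src_list.length : Int) - p) :
    (PySem.List.pyRange 0 p 1).foldl
      (fun item j => item ++ [appendTo3Port (PySem.List.pyGetD src_list (i + j) "")]) []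
      = PySem.List.slice
          ((PySem.List.slice src_list none (some ((src_list.length : Int) - p + p - 1))).map appendTo3Port)
          (some i) (some (i + p)) := by
  have hm1 : (src_list.length : Int) - p + p - 1 = ((src_list.length - 1 : Nat) : Int) := by omega
  rw [hm1, PySem.List.slice_to_natCast]
  rw [PySem.List.foldl_append_singleton_eq_map]
  rw [PySem.List.slice_toNat _ hi (by omega)]
  rw [PySem.List.pyRange_one]
  rw [List.map_map]
  simp only [List.nil_append, Int.sub_zero, zero_add]
  have hm : (i + p).toNat - i.toNat = p.toNat := by omega
  rw [hm]
  apply List.ext_getElem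
  · simp
    omega
  · intro k h1 h2
    simp only [List.getElem_map, List.getElem_range, Function.comp_apply]
    simp only [List.length_map, List.length_range] at h1
    have hidx : i + (k : Int) = ((i.toNat + k : Nat) : Int) := by omega
    rw [hidx, PySem.List.pyGetD_natCast]
    rw [List.getElem_take, List.getElem_drop]
    rw [List.getElem_map]
    rw [List.getElem_take]
    rw [List.getD_eq_getElem _ _ (by omega)]

theorem preDataAdd0_eq (src_list : List String) (piece_len : Int) :
    preDataAdd0 src_list piece_len = preDataAdd0_alt src_list piece_len := by
  unfold preDataAdd0 preDataAdd0_alt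
  by_cases hdeg : piece_len ≤ 0 ∨ (src_list.length : Int) - piece_len ≤ 0
  · rw [if_pos hdeg]
    rw [PySem.List.foldl_append_singleton_eq_map]
    apply List.map_congr_left
    intro i hi
    rcases hdeg with h | h
    · rw [PySem.List.pyRange_one_eq_nil h]
      simp
    · rw [PySem.List.mem_pyRange_one] at hi
      omega
  · rw [if_neg hdeg]
    rw [not_or, not_le, not_le] at hdeg
    rw [PySem.List.foldl_append_singleton_eq_map]
    apply List.map_congr_left
    intro i hi
    rw [PySem.List.mem_pyRange_one] at hi
    exact window_eq src_list piece_len i hdeg.1 hi.1 hi.2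

-- ===== VERDICT (by name: the statement is the Claim_ definition above) =====
theorem preDataAdd0_spec : Claim_equal_preDataAdd0 := by
  intro src_list piece_len _ _
  unfold Spec_preDataAdd0
  exact preDataAdd0_eq src_list piece_len
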